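-- pv_equiv track=rewrite | github.com/shadensharp/coding-agent-demo-public | src/coding_agent/render.py | _compact_review_text
-- ===== SOURCE A (Python) =====
-- def _one_line(text: str | None) -> str:
--     if not text:
--         return ""
--     return " ".join(text.strip().split())
--
-- def _compact_review_text(value: object) -> str:
--     text = _one_line(str(value or ""))
--     if not text:
--         return ""
--
--     markers = [
--         "Proposal assessment:",
--         "Grounding:",
--         "Read evidence:",
--         "Evidence:",
--         "Validation:",
--         "Audit:",
--         "LLM note:",
--         "Residual risk:",
--     ]
--     end = len(text)
--     for marker in markers:
--         index = text.find(marker)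
--         if index != -1:
--             end = min(end, index)
--     if end != len(text):
--         return text[:end].rstrip(" .") + "."
--     return text
-- ===== SOURCE B (Python) =====
-- _MARKERS = (
--     "Proposal assessment:",
--     "Grounding:",
--     "Read evidence:",
--     "Evidence:",
--     "Validation:",
--     "Audit:",
--     "LLM note:",
--     "Residual risk:",
-- )
--
-- def _one_line(text):
--     if not text:
--         return ""
--     return " ".join(text.strip().split())
--
-- def _compact_review_text(value):
--     text = _one_line(str(value or ""))
--     for i in range(len(text)):
--         if any(text.startswith(marker, i) for marker in _MARKERS):
--             return text[:i].rstrip(" .") + "."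
--     return text
-- ===== Notes on version B (the rewrite author's own statement) =====
-- stated objective: alternative
-- what changed: Replaces A's eight separate str.find scans plus a running minimum with a single left-to-right scan that returns at the first position where any marker starts.
import Mathlib
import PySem

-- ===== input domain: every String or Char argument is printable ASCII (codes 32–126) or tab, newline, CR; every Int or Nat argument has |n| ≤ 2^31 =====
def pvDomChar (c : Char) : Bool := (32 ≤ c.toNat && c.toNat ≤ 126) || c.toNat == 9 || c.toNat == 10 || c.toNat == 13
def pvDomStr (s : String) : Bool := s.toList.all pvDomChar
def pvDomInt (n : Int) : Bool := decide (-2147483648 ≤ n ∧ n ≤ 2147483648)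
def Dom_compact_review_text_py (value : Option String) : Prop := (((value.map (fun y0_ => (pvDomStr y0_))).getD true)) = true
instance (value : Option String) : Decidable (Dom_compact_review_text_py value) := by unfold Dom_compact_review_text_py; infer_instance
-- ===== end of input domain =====

-- B replaces A's eight find() scans plus a running minimum with one left-to-right scan that
-- returns at the first position where any marker starts (objective: alternative, same result).

-- ===== PORT A =====
-- markers list, shared literal of both Pythons
def pvMarkers : List String :=
  ["Proposal assessment:", "Grounding:", "Read evidence:", "Evidence:",
   "Validation:", "Audit:", "LLM note:", "Residual risk:"]

-- _one_line (identical in A and Source B): '' if falsy else " ".join(text.strip().split())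
def pv_one_line (t : String) : String :=
  if t = "" then "" else PySem.Str.join " " (PySem.Str.split₀ (PySem.Str.strip t))

-- s.rstrip(" .") on code points, ported by hand (exact: drops trailing ' ' and '.'):
def pvRstripSpaceDot (cs : List Char) : List Char :=
  (cs.reverse.dropWhile (fun c => c == ' ' || c == '.')).reverse

def compact_review_text_py (value : Option String) : String :=
  -- str(value or "") on an Option String is value.getD "" (some "" is falsy but yields "" either way)
  let text := pv_one_line (value.getD "")
  if text = "" then ""
  else
    let t := text.toList
    let endv := pvMarkers.foldl (fun e m =>
      let index := PySem.Chars.find t m.toList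
      if index ≠ -1 then min e index else e) ((t.length : Int))
    if endv ≠ (t.length : Int) then
      -- text[:end].rstrip(" .") + "."
      String.ofList (pvRstripSpaceDot (PySem.List.slice t none (some endv)) ++ ['.'])
    else text

-- ===== PORT B =====
-- any(text.startswith(marker, i) for marker in _MARKERS), on the suffix at i
def pvAnyMarker (s : List Char) : Bool :=
  pvMarkers.any (fun m => PySem.Chars.startswith s m.toList)

-- the 'for i in range(len(text))' loop with its early return: first i whose suffix starts a marker
def pvScan : List Char → Nat → Option Nat
  | [], _ => none
  | c :: rest, i => if pvAnyMarker (c :: rest) then some i else pvScan rest (i + 1)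

def compact_review_text_py_alt (value : Option String) : String :=
  let text := pv_one_line (value.getD "")
  match pvScan text.toList 0 with
  | some i => String.ofList (pvRstripSpaceDot (text.toList.take i) ++ ['.'])
  | none => text

-- ===== PRECONDITION & SPEC =====
def Spec_compact_review_text_py (value : Option String) (out : String) : Prop := out = compact_review_text_py_alt value
instance (value : Option String) (out : String) : Decidable (Spec_compact_review_text_py value out) := by unfold Spec_compact_review_text_py; infer_instance

-- ===== CLAIM (what is proved, stated in full; the proofs are below) =====
def Claim_equal_compact_review_text_py : Prop := ∀ (value : Option String), Dom_compact_review_text_py value → Spec_compact_review_text_py value (compact_review_text_py value)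

-- ===== LEMMAS AND PROOFS =====

-- every marker is a nonempty string
lemma pvMarkers_ne_nil : ∀ m ∈ pvMarkers, m.toList ≠ [] := by decide

-- spec of A's fold: the result is the start value or one of the successful finds,
-- it is ≤ the start value and ≤ every successful find
lemma pvFold_spec (t : List Char) (M : List String) (e : Int) :
    (M.foldl (fun e m =>
        let index := PySem.Chars.find t m.toList
        if index ≠ -1 then min e index else e) e = e ∨
      ∃ m ∈ M, PySem.Chars.find t m.toList ≠ -1 ∧
        M.foldl (fun e m =>
          let index := PySem.Chars.find t m.toList
          if index ≠ -1 then min e index else e) e = PySem.Chars.find t m.toList) ∧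
    M.foldl (fun e m =>
        let index := PySem.Chars.find t m.toList
        if index ≠ -1 then min e index else e) e ≤ e ∧
    ∀ m ∈ M, PySem.Chars.find t m.toList ≠ -1 →
      M.foldl (fun e m =>
        let index := PySem.Chars.find t m.toList
        if index ≠ -1 then min e index else e) e ≤ PySem.Chars.find t m.toList := by
  induction M generalizing e with
  | nil => exact ⟨Or.inl rfl, le_rfl, by intro m hm; simp at hm⟩
  | cons m M ih =>
    simp only [List.foldl_cons]
    by_cases h : PySem.Chars.find t m.toList ≠ -1
    · rw [if_pos h]
      obtain ⟨h1, h2, h3⟩ := ih (min e (PySem.Chars.find t m.toList))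
      refine ⟨?_, le_trans h2 (min_le_left _ _), ?_⟩
      · rcases h1 with h1 | ⟨m', hm', hf, he⟩
        · rw [h1]
          rcases le_total e (PySem.Chars.find t m.toList) with hle | hle
          · left; exact min_eq_left hle
          · right; exact ⟨m, List.mem_cons_self, h, min_eq_right hle⟩
        · right; exact ⟨m', List.mem_cons_of_mem _ hm', hf, he⟩
      · intro m' hm' hf
        rcases List.mem_cons.mp hm' with rfl | hm'
        · exact le_trans h2 (min_le_right _ _)
        · exact h3 m' hm' hf
    · rw [if_neg h]
      obtain ⟨h1, h2, h3⟩ := ih e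
      refine ⟨?_, h2, ?_⟩
      · rcases h1 with h1 | ⟨m', hm', hf, he⟩
        · exact Or.inl h1
        · exact Or.inr ⟨m', List.mem_cons_of_mem _ hm', hf, he⟩
      · intro m' hm' hf
        rcases List.mem_cons.mp hm' with rfl | hm'
        · exact absurd hf h
        · exact h3 m' hm' hf

-- a prefix of a suffix is an infix
lemma pvPrefix_drop_infix {m t : List Char} {k : Nat} (h : m <+: t.drop k) : m <:+: t :=
  h.isInfix.trans (t.drop_suffix k).isInfix

-- B's scan: no position starts a marker → none
lemma pvScan_eq_none (l : List Char) (i : Nat)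
    (h : ∀ k, pvAnyMarker (l.drop k) = false) : pvScan l i = none := by
  induction l generalizing i with
  | nil => rfl
  | cons c rest ih =>
    have h0 : pvAnyMarker (c :: rest) = false := by simpa using h 0
    simp only [pvScan]
    rw [if_neg (by simp [h0])]
    exact ih (i + 1) (fun k => by simpa using h (k + 1))

-- B's scan: j is the least position starting a marker → some (i + j)
lemma pvScan_eq_some (l : List Char) (i j : Nat)
    (hj : pvAnyMarker (l.drop j) = true)
    (hmin : ∀ k < j, pvAnyMarker (l.drop k) = false) : pvScan l i = some (i + j) := by
  induction l generalizing i j with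
  | nil =>
    exfalso
    rw [List.drop_nil] at hj
    revert hj; decide
  | cons c rest ih =>
    cases j with
    | zero =>
      simp only [List.drop_zero] at hj
      simp only [pvScan]
      rw [if_pos hj]
      rfl
    | succ k =>
      have h0 : pvAnyMarker (c :: rest) = false := by
        simpa using hmin 0 (Nat.succ_pos k)
      simp only [pvScan]
      rw [if_neg (by simp [h0])]
      have := ih (i + 1) k (by simpa using hj) (fun k' hk' => by
        simpa using hmin (k' + 1) (Nat.succ_lt_succ hk'))
      rw [this]; congr 1; omega

-- pvAnyMarker in terms of prefixes
lemma pvAnyMarker_iff (s : List Char) :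
    pvAnyMarker s = true ↔ ∃ m ∈ pvMarkers, m.toList <+: s := by
  simp only [pvAnyMarker, List.any_eq_true, PySem.Chars.startswith_iff]

-- the core equivalence on the normalized text
lemma pvKey (text : String) :
    (if pvMarkers.foldl (fun e m =>
          let index := PySem.Chars.find text.toList m.toList
          if index ≠ -1 then min e index else e) ((text.toList.length : Int))
        ≠ (text.toList.length : Int) then
       String.ofList (pvRstripSpaceDot (PySem.List.slice text.toList none
         (some (pvMarkers.foldl (fun e m =>
            let index := PySem.Chars.find text.toList m.toList
            if index ≠ -1 then min e index else e) ((text.toList.length : Int))))) ++ ['.'])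
     else text) =
    (match pvScan text.toList 0 with
     | some i => String.ofList (pvRstripSpaceDot (text.toList.take i) ++ ['.'])
     | none => text) := by
  obtain ⟨h1, h2, h3⟩ := pvFold_spec text.toList pvMarkers ((text.toList.length : Int))
  set t := text.toList with ht
  set r := pvMarkers.foldl (fun e m =>
    let index := PySem.Chars.find t m.toList
    if index ≠ -1 then min e index else e) ((t.length : Int)) with hr
  by_cases hcase : r = (t.length : Int)
  · -- no marker found anywhere: A keeps text, B's scan yields none
    have hnone : ∀ m ∈ pvMarkers, PySem.Chars.find t m.toList = -1 := by
      intro m hm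
      by_contra hf
      have hle := h3 m hm hf
      have hle2 := PySem.Chars.find_le_length t m.toList
      have heq : PySem.Chars.find t m.toList = (t.length : Int) :=
        le_antisymm hle2 (hcase ▸ hle)
      have hpos : 0 ≤ PySem.Chars.find t m.toList :=
        (PySem.Chars.find_nonneg_iff t m.toList).mpr
          (by rwa [← PySem.Chars.find_ne_neg_one_iff])
      obtain ⟨hpre, -⟩ := PySem.Chars.find_spec hpos
      rw [heq] at hpre
      simp only [Int.toNat_natCast, List.drop_length] at hpre
      exact pvMarkers_ne_nil m hm (List.prefix_nil.mp hpre)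
    have hscan : pvScan t 0 = none := by
      apply pvScan_eq_none
      intro k
      by_contra hk
      obtain ⟨m, hm, hpre⟩ := (pvAnyMarker_iff _).mp (Bool.of_not_eq_false hk)
      exact (PySem.Chars.find_eq_neg_one_iff t m.toList).mp (hnone m hm)
        (pvPrefix_drop_infix hpre)
    rw [if_neg (not_not_intro hcase), hscan]
  · -- some marker found: r is the least position of any marker
    rcases h1 with h1 | ⟨m₀, hm₀, hf₀, he₀⟩
    · exact absurd h1 hcase
    have hpos : 0 ≤ r := by
      rw [he₀]
      exact (PySem.Chars.find_nonneg_iff t m₀.toList).mpr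
        (by rwa [← PySem.Chars.find_ne_neg_one_iff])
    obtain ⟨hpre₀, -⟩ := PySem.Chars.find_spec (he₀ ▸ hpos)
    rw [← he₀] at hpre₀
    have hAny : pvAnyMarker (t.drop r.toNat) = true :=
      (pvAnyMarker_iff _).mpr ⟨m₀, hm₀, hpre₀⟩
    have hmin : ∀ k < r.toNat, pvAnyMarker (t.drop k) = false := by
      intro k hk
      by_contra hkne
      obtain ⟨m, hm, hpre⟩ := (pvAnyMarker_iff _).mp (Bool.of_not_eq_false hkne)
      have hinf : m.toList <:+: t := pvPrefix_drop_infix hpre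
      have hf : PySem.Chars.find t m.toList ≠ -1 :=
        (PySem.Chars.find_ne_neg_one_iff t m.toList).mpr hinf
      have hle := h3 m hm hf
      have hposm : 0 ≤ PySem.Chars.find t m.toList :=
        (PySem.Chars.find_nonneg_iff t m.toList).mpr hinf
      obtain ⟨-, hmins⟩ := PySem.Chars.find_spec hposm
      exact hmins k (by omega) hpre
    have hscan : pvScan t 0 = some r.toNat := by
      simpa using pvScan_eq_some t 0 r.toNat hAny hmin
    have hslice : PySem.List.slice t none (some r) = t.take r.toNat :=
      PySem.List.slice_to t hpos
    rw [if_pos hcase, hscan, hslice]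

-- ===== VERDICT (by name: the statement is the Claim_ definition above) =====
theorem compact_review_text_py_spec : Claim_equal_compact_review_text_py := by
  intro value _
  unfold Spec_compact_review_text_py compact_review_text_py compact_review_text_py_alt
  by_cases h : pv_one_line (value.getD "") = ""
  · simp only [h, if_pos, String.toList_empty]
    rfl
  · simp only [h, ite_false]
    exact pvKey (pv_one_line (value.getD ""))
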